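-- pv_equiv track=rewrite | github.com/broken-byte/HR_test_environment_with_solutions | searching/medium_problems/triple_sum/brute_force.py | triple_sum
-- ===== SOURCE A (Python) =====
-- def triple_sum(a: list, b: list, c: list) -> int:
--     triplet: list = []
--     triplets: set = set([])
--     for p in a:
--         triplet.clear()
--         triplet.append(p)
--         for q in b:
--             if p <= q:  # keep going
--                 triplet.append(q)
--                 pass
--             else:
--                 continue  # skip this q
--             for r in c:
--                 if q >= r:
--                     triplet.append(r)
--                     hash_triplet: tuple = tuple(triplet)
--                     if hash_triplet not in triplets:
--                         triplets.add(hash_triplet)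
--                     triplet.pop()
--                 else:
--                     continue
--             triplet.pop()  # remove old q
--     return len(triplets)
-- ===== SOURCE B (Python) =====
-- def triple_sum(a: list, b: list, c: list) -> int:
--     # Count distinct triples (p, q, r) with p in a, q in b, r in c, p <= q >= r,
--     # by summing, over each distinct q, (#distinct p <= q) * (#distinct r <= q).
--     ua = set(a)
--     uc = set(c)
--     total = 0
--     for q in set(b):
--         na = sum(1 for p in ua if p <= q)
--         nc = sum(1 for r in uc if r <= q)
--         total += na * nc
--     return total
-- ===== Notes on version B (the rewrite author's own statement) =====
-- stated objective: faster
-- what changed: B drops A's triple nested loop that materialises a hash set of all admissible (p,q,r) triples and instead, after deduplicating a, b and c once, sums over each distinct q the product (#distinct p in a with p<=q) * (#distinct r in c with r<=q), which counts the same set arithmetically.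
import Mathlib
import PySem

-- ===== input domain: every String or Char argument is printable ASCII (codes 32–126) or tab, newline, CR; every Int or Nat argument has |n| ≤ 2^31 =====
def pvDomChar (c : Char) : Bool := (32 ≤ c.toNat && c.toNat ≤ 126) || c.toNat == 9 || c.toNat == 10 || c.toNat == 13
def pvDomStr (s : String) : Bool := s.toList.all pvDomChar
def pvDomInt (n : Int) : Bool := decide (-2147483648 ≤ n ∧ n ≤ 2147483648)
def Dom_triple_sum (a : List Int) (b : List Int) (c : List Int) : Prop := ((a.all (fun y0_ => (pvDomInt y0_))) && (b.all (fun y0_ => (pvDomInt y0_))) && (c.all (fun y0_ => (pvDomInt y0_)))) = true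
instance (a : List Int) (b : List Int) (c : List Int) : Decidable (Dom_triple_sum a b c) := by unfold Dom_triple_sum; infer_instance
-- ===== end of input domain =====

-- B replaces A's cubic loop that materialises a set of triples by a per-distinct-q product
-- of counts of distinct admissible p's and r's (faster: asymptotic).

-- ===== PORT A =====
-- Literal port of A's triple nested loop; A's local `triplet` list only stages the tuple
-- being inserted (append/append/append-pop-pop), so the port builds the tuple directly.
def triple_sum (a : List Int) (b : List Int) (c : List Int) : Int :=
  let triplets : PySem.Set (Int × Int × Int) :=
    a.foldl (fun ts p =>
      b.foldl (fun ts q =>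
        if p ≤ q then
          c.foldl (fun ts r =>
            if q ≥ r then
              if PySem.Set.contains ts (p, q, r) then ts
              else PySem.Set.add ts (p, q, r)
            else ts) ts
        else ts) ts) PySem.Set.empty
  PySem.Set.len triplets

-- ===== PORT B =====
def triple_sum_alt (a : List Int) (b : List Int) (c : List Int) : Int :=
  let ua : PySem.Set Int := PySem.Set.ofList a
  let uc : PySem.Set Int := PySem.Set.ofList c
  (PySem.Set.ofList b).foldl
    (fun total q =>
      let na : Int := (ua.countP (fun p => decide (p ≤ q)) : Int)
      let nc : Int := (uc.countP (fun r => decide (r ≤ q)) : Int)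
      total + na * nc) 0

-- ===== PRECONDITION & SPEC =====
def Spec_triple_sum (a : List Int) (b : List Int) (c : List Int) (out : Int) : Prop := out = triple_sum_alt a b c
instance (a : List Int) (b : List Int) (c : List Int) (out : Int) : Decidable (Spec_triple_sum a b c out) := by unfold Spec_triple_sum; infer_instance

-- ===== CLAIM (what is proved, stated in full; the proofs are below) =====
def Claim_equal_triple_sum : Prop := ∀ (a : List Int) (b : List Int) (c : List Int), Dom_triple_sum a b c → Spec_triple_sum a b c (triple_sum a b c)

-- ===== LEMMAS AND PROOFS =====

-- The finite set both programs count: triples (p,q,r) of distinct values with p ≤ q and r ≤ q.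
def tripleFinset (a b c : List Int) : Finset (Int × Int × Int) :=
  (a.toFinset ×ˢ b.toFinset ×ˢ c.toFinset).filter (fun t => t.1 ≤ t.2.1 ∧ t.2.2 ≤ t.2.1)

-- A's membership-test-then-add is exactly PySem.Set.add.
lemma contains_ite_add {α : Type} [BEq α] [LawfulBEq α] (s : PySem.Set α) (x : α) :
    (if PySem.Set.contains s x then s else PySem.Set.add s x) = PySem.Set.add s x := by
  by_cases h : x ∈ s
  · rw [if_pos ((PySem.Set.contains_iff s x).mpr h), PySem.Set.add_eq_ite, if_pos h]
  · exact if_neg (fun hc => h ((PySem.Set.contains_iff s x).mp hc))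

lemma inner_spec (p q : Int) : ∀ (c : List Int) (ts : List (Int × Int × Int)), ts.Nodup →
    (c.foldl (fun ts r =>
        if q ≥ r then
          if PySem.Set.contains ts (p, q, r) then ts
          else PySem.Set.add ts (p, q, r)
        else ts) ts).Nodup ∧
    ∀ t, t ∈ (c.foldl (fun ts r =>
        if q ≥ r then
          if PySem.Set.contains ts (p, q, r) then ts
          else PySem.Set.add ts (p, q, r)
        else ts) ts) ↔ t ∈ ts ∨ ∃ r ∈ c, r ≤ q ∧ t = (p, q, r) := by
  intro c
  induction c with
  | nil => intro ts h; simpa using h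
  | cons r c ih =>
    intro ts h
    simp only [List.foldl_cons]
    by_cases hr : q ≥ r
    · rw [if_pos hr, contains_ite_add]
      obtain ⟨h1, h2⟩ := ih (PySem.Set.add ts (p, q, r)) (PySem.Set.nodup_add ts _ h)
      refine ⟨h1, fun t => ?_⟩
      rw [h2 t]
      simp only [PySem.Set.mem_add, List.mem_cons]

      constructor
      · rintro ((h | h) | ⟨r', hr', hle, rfl⟩)
        · exact Or.inl h
        · exact Or.inr ⟨r, Or.inl rfl, hr, h⟩
        · exact Or.inr ⟨r', Or.inr hr', hle, rfl⟩
      · rintro (h | ⟨r', (rfl | hr'), hle, rfl⟩)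
        · exact Or.inl (Or.inl h)
        · exact Or.inl (Or.inr rfl)
        · exact Or.inr ⟨r', hr', hle, rfl⟩
    · rw [if_neg hr]
      obtain ⟨h1, h2⟩ := ih ts h
      refine ⟨h1, fun t => ?_⟩
      rw [h2 t]
      simp only [List.mem_cons]
      constructor
      · rintro (h | ⟨r', hr', hle, rfl⟩)
        · exact Or.inl h
        · exact Or.inr ⟨r', Or.inr hr', hle, rfl⟩
      · rintro (h | ⟨r', (rfl | hr'), hle, rfl⟩)
        · exact Or.inl h
        · exact absurd hle hr
        · exact Or.inr ⟨r', hr', hle, rfl⟩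

lemma mid_spec (p : Int) (c : List Int) : ∀ (b : List Int) (ts : List (Int × Int × Int)), ts.Nodup →
    (b.foldl (fun ts q =>
        if p ≤ q then
          c.foldl (fun ts r =>
            if q ≥ r then
              if PySem.Set.contains ts (p, q, r) then ts
              else PySem.Set.add ts (p, q, r)
            else ts) ts
        else ts) ts).Nodup ∧
    ∀ t, t ∈ (b.foldl (fun ts q =>
        if p ≤ q then
          c.foldl (fun ts r =>
            if q ≥ r then
              if PySem.Set.contains ts (p, q, r) then ts
              else PySem.Set.add ts (p, q, r)
            else ts) ts
        else ts) ts) ↔ t ∈ ts ∨ ∃ q ∈ b, p ≤ q ∧ ∃ r ∈ c, r ≤ q ∧ t = (p, q, r) := by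
  intro b
  induction b with
  | nil => intro ts h; simpa using h
  | cons q b ih =>
    intro ts h
    simp only [List.foldl_cons]
    by_cases hq : p ≤ q
    · rw [if_pos hq]
      obtain ⟨hn, hm⟩ := inner_spec p q c ts h
      obtain ⟨h1, h2⟩ := ih _ hn
      refine ⟨h1, fun t => ?_⟩
      rw [h2 t]
      simp only [List.mem_cons]
      constructor
      · rintro (h' | ⟨q', hq', hle, r', hr', hrle, rfl⟩)
        · rcases (hm t).mp h' with h'' | ⟨r', hr', hrle, rfl⟩
          · exact Or.inl h''
          · exact Or.inr ⟨q, Or.inl rfl, hq, r', hr', hrle, rfl⟩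
        · exact Or.inr ⟨q', Or.inr hq', hle, r', hr', hrle, rfl⟩
      · rintro (h' | ⟨q', (rfl | hq'), hle, r', hr', hrle, rfl⟩)
        · exact Or.inl ((hm t).mpr (Or.inl h'))
        · exact Or.inl ((hm _).mpr (Or.inr ⟨r', hr', hrle, rfl⟩))
        · exact Or.inr ⟨q', hq', hle, r', hr', hrle, rfl⟩
    · rw [if_neg hq]
      obtain ⟨h1, h2⟩ := ih ts h
      refine ⟨h1, fun t => ?_⟩
      rw [h2 t]
      simp only [List.mem_cons]
      constructor
      · rintro (h' | ⟨q', hq', hle, rest⟩)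
        · exact Or.inl h'
        · exact Or.inr ⟨q', Or.inr hq', hle, rest⟩
      · rintro (h' | ⟨q', (rfl | hq'), hle, rest⟩)
        · exact Or.inl h'
        · exact absurd hle hq
        · exact Or.inr ⟨q', hq', hle, rest⟩

lemma outer_spec (b c : List Int) : ∀ (a : List Int) (ts : List (Int × Int × Int)), ts.Nodup →
    (a.foldl (fun ts p =>
        b.foldl (fun ts q =>
          if p ≤ q then
            c.foldl (fun ts r =>
              if q ≥ r then
                if PySem.Set.contains ts (p, q, r) then ts
                else PySem.Set.add ts (p, q, r)
              else ts) ts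
          else ts) ts) ts).Nodup ∧
    ∀ t, t ∈ (a.foldl (fun ts p =>
        b.foldl (fun ts q =>
          if p ≤ q then
            c.foldl (fun ts r =>
              if q ≥ r then
                if PySem.Set.contains ts (p, q, r) then ts
                else PySem.Set.add ts (p, q, r)
              else ts) ts
          else ts) ts) ts) ↔
      t ∈ ts ∨ ∃ p ∈ a, ∃ q ∈ b, p ≤ q ∧ ∃ r ∈ c, r ≤ q ∧ t = (p, q, r) := by
  intro a
  induction a with
  | nil => intro ts h; simpa using h
  | cons p a ih =>
    intro ts h
    simp only [List.foldl_cons]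
    obtain ⟨hn, hm⟩ := mid_spec p c b ts h
    obtain ⟨h1, h2⟩ := ih _ hn
    refine ⟨h1, fun t => ?_⟩
    rw [h2 t]
    simp only [List.mem_cons]
    constructor
    · rintro (h' | ⟨p', hp', rest⟩)
      · rcases (hm t).mp h' with h'' | ⟨q', hq', rest⟩
        · exact Or.inl h''
        · exact Or.inr ⟨p, Or.inl rfl, q', hq', rest⟩
      · exact Or.inr ⟨p', Or.inr hp', rest⟩
    · rintro (h' | ⟨p', (rfl | hp'), rest⟩)
      · exact Or.inl ((hm t).mpr (Or.inl h'))
      · exact Or.inl ((hm t).mpr (Or.inr rest))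
      · exact Or.inr ⟨p', hp', rest⟩

lemma triple_sum_eq_card (a b c : List Int) :
    triple_sum a b c = ((tripleFinset a b c).card : Int) := by
  simp only [triple_sum]
  obtain ⟨hn, hm⟩ := outer_spec b c a PySem.Set.empty (by simp [PySem.Set.empty])
  have hfin : (a.foldl (fun ts p =>
      b.foldl (fun ts q =>
        if p ≤ q then
          c.foldl (fun ts r =>
            if q ≥ r then
              if PySem.Set.contains ts (p, q, r) then ts
              else PySem.Set.add ts (p, q, r)
            else ts) ts
        else ts) ts) PySem.Set.empty).toFinset = tripleFinset a b c := by
    apply Finset.ext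
    intro t
    rw [List.mem_toFinset, hm t]
    unfold tripleFinset
    simp only [Finset.mem_filter, Finset.mem_product, List.mem_toFinset, PySem.Set.empty]
    constructor
    · rintro (h | ⟨p, hp, q, hq, hle, r, hr, hrle, rfl⟩)
      · simp at h
      · exact ⟨⟨hp, hq, hr⟩, hle, hrle⟩
    · rintro ⟨⟨hp, hq, hr⟩, hle, hrle⟩
      exact Or.inr ⟨t.1, hp, t.2.1, hq, hle, t.2.2, hr, hrle, rfl⟩
  have hcard := List.toFinset_card_of_nodup hn
  rw [hfin] at hcard
  simp only [PySem.Set.len]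
  rw [← hcard]

lemma fiber_eq (a c : List Int) (q : Int) :
    {t ∈ tripleFinset a [q] c | t.2.1 = q} =
      ({x ∈ a.toFinset | x ≤ q}) ×ˢ (({q} : Finset Int) ×ˢ ({x ∈ c.toFinset | x ≤ q})) := by
  apply Finset.ext
  rintro ⟨p, q', r⟩
  unfold tripleFinset
  simp only [Finset.mem_filter, Finset.mem_product, Finset.mem_singleton, List.mem_toFinset,
    List.mem_singleton]
  constructor
  · rintro ⟨⟨⟨hp, hq, hr⟩, hle, hrle⟩, rfl⟩
    exact ⟨⟨hp, hle⟩, rfl, hr, hrle⟩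
  · rintro ⟨⟨hp, hle⟩, rfl, hr, hrle⟩
    exact ⟨⟨⟨hp, rfl, hr⟩, hle, hrle⟩, rfl⟩

lemma card_tripleFinset (a b c : List Int) :
    (tripleFinset a b c).card =
      ∑ q ∈ b.toFinset, ({x ∈ a.toFinset | x ≤ q}).card * ({x ∈ c.toFinset | x ≤ q}).card := by
  rw [Finset.card_eq_sum_card_fiberwise (f := fun t => t.2.1) (t := b.toFinset)
    (by rintro ⟨p, q, r⟩ ht
        simp only [tripleFinset, Finset.mem_coe, Finset.mem_filter, Finset.mem_product,
          List.mem_toFinset] at ht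
        simpa using ht.1.2.1)]
  refine Finset.sum_congr rfl fun q hq => ?_
  have : {t ∈ tripleFinset a b c | t.2.1 = q} = {t ∈ tripleFinset a [q] c | t.2.1 = q} := by
    apply Finset.ext
    rintro ⟨p, q', r⟩
    unfold tripleFinset
    simp only [Finset.mem_filter, Finset.mem_product, List.mem_toFinset, List.mem_singleton]
    constructor
    · rintro ⟨⟨⟨hp, _, hr⟩, hle, hrle⟩, rfl⟩
      exact ⟨⟨⟨hp, rfl, hr⟩, hle, hrle⟩, rfl⟩
    · rintro ⟨⟨⟨hp, rfl, hr⟩, hle, hrle⟩, _⟩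
      exact ⟨⟨⟨hp, List.mem_toFinset.mp hq, hr⟩, hle, hrle⟩, rfl⟩
  rw [this, fiber_eq]
  simp [Finset.card_product]

lemma toFinset_ofList (l : List Int) : (PySem.Set.ofList l).toFinset = l.toFinset := by
  apply Finset.ext
  intro x
  simp [List.mem_toFinset, PySem.Set.mem_ofList]

lemma countP_ofList_eq_card (l : List Int) (q : Int) :
    ((PySem.Set.ofList l).countP (fun x => decide (x ≤ q))) = ({x ∈ l.toFinset | x ≤ q}).card := by
  rw [List.countP_eq_length_filter]
  have hnodup : ((PySem.Set.ofList l).filter (fun x => decide (x ≤ q))).Nodup :=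
    (PySem.Set.nodup_ofList l).filter _
  rw [← List.toFinset_card_of_nodup hnodup, List.toFinset_filter, toFinset_ofList]
  exact congrArg Finset.card (Finset.filter_congr (fun x _ => by simp))

lemma triple_sum_alt_eq (a b c : List Int) :
    triple_sum_alt a b c =
      ((∑ q ∈ b.toFinset, ({x ∈ a.toFinset | x ≤ q}).card * ({x ∈ c.toFinset | x ≤ q}).card : ℕ) : Int) := by
  simp only [triple_sum_alt]
  rw [PySem.List.foldl_add (PySem.Set.ofList b)
    (fun q => ((PySem.Set.ofList a).countP (fun p => decide (p ≤ q)) : Int) *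
      ((PySem.Set.ofList c).countP (fun r => decide (r ≤ q)) : Int)) 0]
  rw [zero_add, ← List.sum_toFinset _ (PySem.Set.nodup_ofList b), toFinset_ofList]
  push_cast
  refine Finset.sum_congr rfl fun q hq => ?_
  rw [countP_ofList_eq_card a q, countP_ofList_eq_card c q]

-- ===== VERDICT (by name: the statement is the Claim_ definition above) =====
theorem triple_sum_spec : Claim_equal_triple_sum := by
  intro a b c _
  unfold Spec_triple_sum
  rw [triple_sum_eq_card, triple_sum_alt_eq, card_tripleFinset]
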